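-- pv_equiv track=rewrite | github.com/Wamedina/Tesis-Magister | Backup Codes/Modelo Cielo Abierto editado.py | Separador_Variable_CA
-- ===== SOURCE A (Python) =====
-- def Separador_Variable_CA (LISTA_VARIABLE_X, bloques_CA):
--     j = 0
--     blocks_year =[]
--     aux_year = []
--     for i in LISTA_VARIABLE_X:
--         if i == 1:
--             a = j//len(bloques_CA)+1
--             b = j%len(bloques_CA)
--             aux_year.append(int(b))
--         if (j+1)%len(bloques_CA) == 0:
--             aux_year.sort(reverse = True)
--             blocks_year.append(aux_year)
--             aux_year=[]
--         j += 1
--     return blocks_year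
-- ===== SOURCE B (Python) =====
-- def Separador_Variable_CA(LISTA_VARIABLE_X, bloques_CA):
--     L = len(bloques_CA)
--     if not LISTA_VARIABLE_X:
--         return []
--     q = len(LISTA_VARIABLE_X) // L  # number of complete blocks (ZeroDivisionError when L == 0, as in A)
--     out = []
--     rest = LISTA_VARIABLE_X
--     for _ in range(q):
--         chunk, rest = rest[:L], rest[L:]
--         positions = [idx for idx, v in enumerate(chunk) if v == 1]
--         positions.reverse()
--         out.append(positions)
--     return out
-- ===== Notes on version B (the rewrite author's own statement) =====
-- stated objective: simpler
-- what changed: Replaces the flat single-pass modular-boundary state machine (running index j, j%L bookkeeping, reverse-sort at each boundary) with an explicit block-by-block scan: split off one L-sized chunk at a time, collect the hit indices by enumeration (already ascending) and just reverse them, dropping the trailing partial block by computing len(X)//L up front.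
import Mathlib
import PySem

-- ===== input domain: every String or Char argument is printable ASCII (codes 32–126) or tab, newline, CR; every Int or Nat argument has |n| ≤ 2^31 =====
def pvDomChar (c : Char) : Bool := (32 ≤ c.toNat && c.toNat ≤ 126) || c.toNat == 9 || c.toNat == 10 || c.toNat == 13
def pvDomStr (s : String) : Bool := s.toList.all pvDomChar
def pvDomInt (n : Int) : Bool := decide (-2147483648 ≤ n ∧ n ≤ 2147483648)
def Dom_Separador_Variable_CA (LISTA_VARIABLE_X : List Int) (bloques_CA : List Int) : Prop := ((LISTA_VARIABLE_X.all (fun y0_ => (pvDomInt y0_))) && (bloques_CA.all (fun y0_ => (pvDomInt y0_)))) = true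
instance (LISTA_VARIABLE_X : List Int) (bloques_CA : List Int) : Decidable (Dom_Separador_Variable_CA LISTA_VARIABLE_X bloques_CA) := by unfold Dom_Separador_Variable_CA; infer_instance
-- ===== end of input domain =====

-- B replaces A's flat modular-boundary state machine by a block-by-block scan (chunk, enumerate, reverse),
-- dropping the sort; objective: simpler. Return-value equivalence only (neither mutates its arguments).

-- ===== PORT A =====
-- loop body of A's for-loop (state: (j, blocks_year, aux_year))
def pvAStep (L : Int) (st : Int × List (List Int) × List Int) (i : Int) :
    Int × List (List Int) × List Int :=
  let j := st.1
  let blocks := st.2.1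
  let aux := st.2.2
  let aux :=
    if i = 1 then
      let _a := PySem.Int.floordiv j L + 1   -- 'a' is computed but unused in A
      let b := PySem.Int.mod j L
      aux ++ [b]                              -- int(b) = b
    else aux
  if PySem.Int.mod (j + 1) L = 0 then
    (j + 1, blocks ++ [PySem.List.sorted aux (fun x => x) true], ([] : List Int))
  else
    (j + 1, blocks, aux)

def Separador_Variable_CA (LISTA_VARIABLE_X : List Int) (bloques_CA : List Int) : List (List Int) :=
  (LISTA_VARIABLE_X.foldl (pvAStep (bloques_CA.length : Int)) (0, [], [])).2.1

-- ===== PORT B =====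
-- the for-loop over range(q) of Source B, as recursion on q (state: rest; out is accumulated in order)
def pvAltGo (L : Int) : Nat → List Int → List (List Int)
  | 0, _ => []
  | Nat.succ q, rest =>
      let chunk := PySem.List.slice rest none (some L)          -- rest[:L]
      let rest' := PySem.List.slice rest (some L) none          -- rest[L:]
      let positions :=
        ((PySem.List.enumerate chunk 0).filter (fun p => p.2 = 1)).map (fun p => p.1)
      positions.reverse :: pvAltGo L q rest'

def Separador_Variable_CA_alt (LISTA_VARIABLE_X : List Int) (bloques_CA : List Int) : List (List Int) :=
  let L : Int := (bloques_CA.length : Int)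
  if LISTA_VARIABLE_X = [] then []
  else
    let q := (PySem.Int.floordiv (LISTA_VARIABLE_X.length : Int) L).toNat
    pvAltGo L q LISTA_VARIABLE_X

-- ===== PRECONDITION & SPEC =====
-- Pre_ excludes exactly the inputs on which A raises ZeroDivisionError: a non-empty
-- LISTA_VARIABLE_X together with an empty bloques_CA (len(bloques_CA) == 0 is used as divisor).
def Pre_Separador_Variable_CA (LISTA_VARIABLE_X : List Int) (bloques_CA : List Int) : Prop :=
  bloques_CA ≠ [] ∨ LISTA_VARIABLE_X = []
instance (LISTA_VARIABLE_X : List Int) (bloques_CA : List Int) : Decidable (Pre_Separador_Variable_CA LISTA_VARIABLE_X bloques_CA) := by unfold Pre_Separador_Variable_CA; infer_instance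

def pvWitness_Separador_Variable_CA : List Int × List Int := ([1, 0, 1, 1, 0], [7, 8])

def Spec_Separador_Variable_CA (LISTA_VARIABLE_X : List Int) (bloques_CA : List Int) (out : List (List Int)) : Prop := out = Separador_Variable_CA_alt LISTA_VARIABLE_X bloques_CA
instance (LISTA_VARIABLE_X : List Int) (bloques_CA : List Int) (out : List (List Int)) : Decidable (Spec_Separador_Variable_CA LISTA_VARIABLE_X bloques_CA out) := by unfold Spec_Separador_Variable_CA; infer_instance

-- ===== CLAIM (what is proved, stated in full; the proofs are below) =====
def Claim_equal_Separador_Variable_CA : Prop := ∀ (LISTA_VARIABLE_X : List Int) (bloques_CA : List Int), Dom_Separador_Variable_CA LISTA_VARIABLE_X bloques_CA → Pre_Separador_Variable_CA LISTA_VARIABLE_X bloques_CA → Spec_Separador_Variable_CA LISTA_VARIABLE_X bloques_CA (Separador_Variable_CA LISTA_VARIABLE_X bloques_CA)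

-- ===== LEMMAS AND PROOFS =====

-- the ascending list of 1-positions of c, offset by off
def pvPos (off : Int) (c : List Int) : List Int :=
  ((PySem.List.enumerate c off).filter (fun p => p.2 = 1)).map (fun p => p.1)

theorem pvPos_cons (off : Int) (i : Int) (c : List Int) :
    pvPos off (i :: c) = (if i = 1 then [off] else []) ++ pvPos (off + 1) c := by
  simp [pvPos, PySem.List.enumerate_cons, List.filter]
  split_ifs with h <;> simp [h]

theorem pvPos_sorted_inner (off : Int) (c : List Int) :
    (pvPos off c).Pairwise (· < ·) := by
  unfold pvPos
  apply List.Pairwise.map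
  case H => exact fun a b h => h
  exact (PySem.List.pairwise_lt_enumerate c off).filter _

-- reverse-sorting the ascending position list is reversing it
theorem pvSorted_pos (off : Int) (c : List Int) :
    PySem.List.sorted (pvPos off c) (fun x => x) true = (pvPos off c).reverse := by
  apply PySem.List.sorted_rev_eq_of_perm_of_pairwise_gt
  · exact (pvPos off c).reverse_perm
  · rw [List.pairwise_reverse]
    exact (pvPos_sorted_inner off c).imp (fun h => h)

-- inner chunk lemma: folding A's body over a chunk that stays within one block
theorem pvInner (n : Nat) (hn : 0 < n) (c : List Int) :
    ∀ (off j0 : Nat) (blocks : List (List Int)) (aux : List Int),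
    off < n → off + c.length ≤ n →
    List.foldl (pvAStep (n : Int)) (((j0 * n + off : Nat) : Int), blocks, aux) c =
      if off + c.length = n then
        ((((j0 + 1) * n : Nat) : Int), blocks ++ [PySem.List.sorted (aux ++ pvPos (off : Int) c) (fun x => x) true], ([] : List Int))
      else
        (((j0 * n + off + c.length : Nat) : Int), blocks, aux ++ pvPos (off : Int) c) := by
  induction c with
  | nil =>
      intro off j0 blocks aux hoff hle
      simp only [List.foldl_nil, List.length_nil, Nat.add_zero]
      rw [if_neg (by omega)]
      simp [pvPos, PySem.List.enumerate_nil]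
  | cons i c ih =>
      intro off j0 blocks aux hoff hle
      simp only [List.length_cons] at hle ⊢
      have hmod : PySem.Int.mod ((j0 * n + off : Nat) : Int) (n : Int) = ((off : Nat) : Int) := by
        rw [PySem.Int.mod_natCast]
        congr 1
        rw [Nat.mul_comm, Nat.mul_add_mod, Nat.mod_eq_of_lt hoff]
      have hsucc : ((j0 * n + off : Nat) : Int) + 1 = ((j0 * n + off + 1 : Nat) : Int) := by push_cast; ring
      have hmod1 : PySem.Int.mod ((j0 * n + off + 1 : Nat) : Int) (n : Int) = (((off + 1) % n : Nat) : Int) := by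
        rw [PySem.Int.mod_natCast]
        congr 1
        rw [Nat.add_assoc, Nat.mul_comm, Nat.mul_add_mod]
      have step : (if i = 1 then aux ++ [((off : Nat) : Int)] else aux)
          = aux ++ (if i = 1 then [((off : Nat) : Int)] else []) := by
        split_ifs <;> simp
      by_cases hb : off + 1 = n
      · -- block boundary: the rest of the chunk must be empty
        have hc : c = [] := by
          have : c.length = 0 := by omega
          exact List.eq_nil_of_length_eq_zero this
        subst hc
        have hz : (((off + 1) % n : Nat) : Int) = 0 := by rw [hb]; simp
        simp only [List.foldl_cons, List.foldl_nil, pvAStep, hmod, hsucc, hmod1, hz, if_true,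
          List.length_nil, Nat.zero_add]
        rw [if_pos hb]
        simp only [Prod.mk.injEq]
        refine ⟨by congr 1; subst hb; ring, ?_, trivial⟩
        congr 2
        rw [step, pvPos_cons]
        simp [pvPos, PySem.List.enumerate_nil]
      · -- interior of the block
        have hoff1 : off + 1 < n := by omega
        have hz : ¬ ((((off + 1) % n : Nat) : Int) = 0) := by
          rw [Nat.mod_eq_of_lt hoff1]
          exact_mod_cast Nat.succ_ne_zero off
        simp only [List.foldl_cons, pvAStep, hmod, hsucc, hmod1]
        rw [if_neg hz, step]
        have hIH := ih (off + 1) j0 blocks (aux ++ (if i = 1 then [((off : Nat) : Int)] else []))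
          hoff1 (by omega)
        have harg : ((j0 * n + off + 1 : Nat) : Int) = ((j0 * n + (off + 1) : Nat) : Int) := by
          push_cast; ring
        rw [harg, hIH, pvPos_cons]
        by_cases hfin : off + 1 + c.length = n
        · have hfin' : off + (c.length + 1) = n := by omega
          rw [if_pos hfin, if_pos hfin']
          simp [List.append_assoc]
        · have hfin' : ¬ (off + (c.length + 1) = n) := by omega
          rw [if_neg hfin, if_neg hfin']
          simp only [Prod.mk.injEq]
          refine ⟨by congr 1; omega, trivial, by simp [List.append_assoc]⟩

-- outer lemma: A's fold from a block-aligned index produces B's block list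
theorem pvOuter (n : Nat) (hn : 0 < n) :
    ∀ (q : Nat) (X : List Int) (j0 : Nat) (blocks : List (List Int)),
    X.length / n = q →
    (X.foldl (pvAStep (n : Int)) (((j0 * n : Nat) : Int), blocks, ([] : List Int))).2.1
      = blocks ++ pvAltGo (n : Int) q X := by
  intro q
  induction q with
  | zero =>
      intro X j0 blocks hq
      have hlt : X.length < n := by
        by_contra h
        have h2 := Nat.div_le_div_right (c := n) (Nat.le_of_not_lt h)
        rw [hq, Nat.div_self hn] at h2
        omega
      have h0 : ((j0 * n : Nat) : Int) = ((j0 * n + 0 : Nat) : Int) := by norm_num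
      rw [h0, pvInner n hn X 0 j0 blocks [] hn (by omega)]
      rw [if_neg (by omega)]
      simp [pvAltGo]
  | succ q ih =>
      intro X j0 blocks hq
      have hge : n ≤ X.length := by
        by_contra h
        rw [Nat.div_eq_of_lt (by omega)] at hq
        exact Nat.succ_ne_zero q hq.symm
      have hsplit : X = X.take n ++ X.drop n := (List.take_append_drop n X).symm
      have hlen : (X.take n).length = n := by simp [Nat.min_eq_left hge]
      conv_lhs => rw [hsplit]
      rw [List.foldl_append]
      have h0 : ((j0 * n : Nat) : Int) = ((j0 * n + 0 : Nat) : Int) := by norm_num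
      rw [h0, pvInner n hn (X.take n) 0 j0 blocks [] hn (by omega)]
      rw [if_pos (by omega)]
      have hq' : (X.drop n).length / n = q := by
        have hd : (X.drop n).length = X.length - n := by simp
        have hdm := Nat.div_add_mod X.length n
        rw [hq] at hdm
        have hmlt : X.length % n < n := Nat.mod_lt _ hn
        have hnq : n * (q + 1) = n * q + n := by ring
        have hsub : X.length - n = n * q + X.length % n := by omega
        rw [hd, hsub, Nat.mul_add_div hn, Nat.div_eq_of_lt hmlt]
        omega
      rw [ih (X.drop n) (j0 + 1) _ hq']
      have hchunk : PySem.List.slice X none (some ((n : Nat) : Int)) = X.take n :=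
        PySem.List.slice_to_natCast X n
      have hrest : PySem.List.slice X (some ((n : Nat) : Int)) none = X.drop n :=
        PySem.List.slice_from_natCast X n
      show _ = blocks ++ pvAltGo (n : Int) (q + 1) X
      rw [pvAltGo]
      simp only [hchunk, hrest]
      rw [List.append_assoc]
      congr 1
      simp only [List.nil_append]
      rw [pvSorted_pos]
      rfl

-- ===== VERDICT (by name: the statement is the Claim_ definition above) =====
theorem Separador_Variable_CA_spec : Claim_equal_Separador_Variable_CA := by
  intro X B _hdom hpre
  unfold Spec_Separador_Variable_CA
  by_cases hX : X = []
  · subst hX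
    simp [Separador_Variable_CA, Separador_Variable_CA_alt]
  · have hB : B ≠ [] := by
      rcases hpre with h | h
      · exact h
      · exact absurd h hX
    have hn : 0 < B.length := List.length_pos_of_ne_nil hB
    unfold Separador_Variable_CA Separador_Variable_CA_alt
    rw [if_neg hX]
    have h0 : (0 : Int) = ((0 * B.length : Nat) : Int) := by norm_num
    rw [h0, pvOuter B.length hn (X.length / B.length) X 0 [] rfl]
    have hq : (PySem.Int.floordiv ((X.length : Nat) : Int) ((B.length : Nat) : Int)).toNat
        = X.length / B.length := by
      rw [PySem.Int.floordiv_natCast]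
      exact Int.toNat_natCast _
    simp only [List.nil_append, hq]
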